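-- pv_equiv track=rewrite | github.com/Soundboy007/cryptography | RSA Encryption and Decryption/main.py | mes2dec
-- ===== SOURCE A (Python) =====
-- def mes2dec(m):
--   binary = []
--   for i in range(len(m)):
--     binary.append(bin(ord(m[i]))[2:])
--   for i in range(len(binary)):
--     while len(binary[i]) % 7 != 0:
--       binary[i] = '0' + binary[i]
--   return int((''.join(binary)),2)
-- ===== SOURCE B (Python) =====
-- def mes2dec(m):
--   result = 0
--   for c in m:
--     w = 7 * ((len(format(ord(c), 'b')) + 6) // 7)
--     result = (result << w) | ord(c)
--   return result
-- ===== Notes on version B (the rewrite author's own statement) =====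
-- stated objective: alternative
-- what changed: B accumulates the result directly with integer shift-and-or (one arithmetic pass over the characters) instead of building per-character binary strings, padding them by repeated string prepending, joining and re-parsing the joined string in base 2.
-- outside the precondition, e.g. on mes2dec(''): A raises ValueError, B returns 0
import Mathlib
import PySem

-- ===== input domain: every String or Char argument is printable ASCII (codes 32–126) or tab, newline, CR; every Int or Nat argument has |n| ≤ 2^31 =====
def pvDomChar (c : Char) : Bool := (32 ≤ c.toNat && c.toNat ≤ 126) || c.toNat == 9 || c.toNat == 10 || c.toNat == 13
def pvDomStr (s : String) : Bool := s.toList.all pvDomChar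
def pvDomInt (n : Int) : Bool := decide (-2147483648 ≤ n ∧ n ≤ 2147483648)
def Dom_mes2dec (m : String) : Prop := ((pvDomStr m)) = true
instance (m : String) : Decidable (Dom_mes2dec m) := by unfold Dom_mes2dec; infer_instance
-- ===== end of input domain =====

-- B replaces A's build-binary-strings / pad / join / int(·,2) pipeline by a single
-- shift-and-or arithmetic accumulation; A raises ValueError on "" (excluded by Pre_), B returns 0 there.

-- ===== PORT A =====
-- A's inner while loop: prepend '0' until the length is a multiple of 7; at most 6
-- prepends are ever needed, so fuel 7 makes the same loop total (same iterations).
def padGo : Nat → List Char → List Char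
  | 0, s => s
  | f + 1, s => if s.length % 7 ≠ 0 then padGo f ('0' :: s) else s

-- hand port of int(s, 2): exact on nonempty strings of '0'/'1' digits, which is all
-- A ever parses (the empty string, where int('',2) raises ValueError, is outside Pre_).
def parseBin (l : List Char) : Int :=
  l.foldl (fun a c => a * 2 + (if c = '1' then 1 else 0)) 0

def mes2dec (m : String) : Int :=
  -- first loop builds binary = [bin(ord(m[i]))[2:]] (PySem.Int.toBinChars = bin(n)[2:] for n ≥ 0),
  -- second loop left-pads each entry to a multiple of 7, then int(''.join(binary), 2)
  parseBin (((m.toList.map (fun c => PySem.Int.toBinChars (c.toNat : Int))).map (padGo 7)).flatten)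

-- ===== PORT B =====
def mes2dec_alt (m : String) : Int :=
  m.toList.foldl
    (fun result c =>
      let w : Nat := 7 * (((PySem.Int.toBinChars (c.toNat : Int)).length + 6) / 7)
      PySem.Int.bor (result <<< w) (c.toNat : Int)) 0

-- ===== PRECONDITION & SPEC =====
-- A raises ValueError on the empty string (int('', 2) fails); Pre_ excludes exactly that input (B returns 0 there).
def Pre_mes2dec (m : String) : Prop := m ≠ ""
instance (m : String) : Decidable (Pre_mes2dec m) := by unfold Pre_mes2dec; infer_instance
def pvWitness_mes2dec : String := "Hi"

def Spec_mes2dec (m : String) (out : Int) : Prop := out = mes2dec_alt m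
instance (m : String) (out : Int) : Decidable (Spec_mes2dec m out) := by unfold Spec_mes2dec; infer_instance

-- ===== CLAIM (what is proved, stated in full; the proofs are below) =====
def Claim_equal_mes2dec : Prop := ∀ (m : String), Dom_mes2dec m → Pre_mes2dec m → Spec_mes2dec m (mes2dec m)

-- ===== LEMMAS AND PROOFS =====

-- the common arithmetic step both sides reduce to
def arithStep (a : Int) (c : Char) : Int := a * 128 + (c.toNat : Int)

-- the parsing fold is affine in its accumulator
theorem parse_affine (s : List Char) : ∀ acc : Int,
    s.foldl (fun a c => a * 2 + (if c = '1' then 1 else 0)) acc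
      = acc * 2 ^ s.length + s.foldl (fun a c => a * 2 + (if c = '1' then 1 else 0)) 0 := by
  induction s with
  | nil => intro acc; simp
  | cons c s ih =>
      intro acc
      simp only [List.foldl_cons, List.length_cons]
      rw [ih (acc * 2 + _), ih (0 * 2 + _)]
      ring

-- per-character facts, decided over all admissible codes n ≤ 126
theorem block_spec : ∀ n : Nat, n ≤ 126 →
    (padGo 7 (PySem.Int.toBinChars (n : Int))).length = 7 ∧
    parseBin (padGo 7 (PySem.Int.toBinChars (n : Int))) = (n : Int) := by
  decide

theorem width_spec : ∀ n : Nat, n ≤ 126 →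
    ((PySem.Int.toBinChars (n : Int)).length + 6) / 7 = 1 := by
  decide

theorem dom_char_le {c : Char} (h : pvDomChar c = true) : c.toNat ≤ 126 := by
  simp [pvDomChar] at h
  omega

-- shift-and-or on a nonnegative accumulator is the arithmetic step
theorem bor_step (a : Int) (n : Nat) (ha : 0 ≤ a) (hn : n ≤ 126) :
    PySem.Int.bor (a <<< (7 : Nat)) (n : Int) = a * 128 + (n : Int) := by
  obtain ⟨k, rfl⟩ := Int.eq_ofNat_of_zero_le ha
  have h1 : ((k : Int) <<< (7 : Nat)) = ((k <<< 7 : Nat) : Int) := by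
    simp [Int.shiftLeft_eq, Nat.shiftLeft_eq]
  rw [h1, PySem.Int.bor_natCast]
  have h2 : k <<< 7 ||| n = k <<< 7 + n := by
    rw [Nat.shiftLeft_eq, Nat.mul_comm]
    exact (Nat.two_pow_add_eq_or_of_lt (by omega : n < 2 ^ 7) k).symm
  rw [h2, Nat.shiftLeft_eq]
  push_cast
  ring

-- A's parse of the flattened padded blocks is the arithmetic fold
theorem a_fold (cs : List Char) : ∀ acc : Int, (∀ c ∈ cs, pvDomChar c = true) →
    ((cs.map (fun c => padGo 7 (PySem.Int.toBinChars (c.toNat : Int)))).flatten).foldl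
        (fun a c => a * 2 + (if c = '1' then 1 else 0)) acc
      = cs.foldl arithStep acc := by
  induction cs with
  | nil => intro acc _; simp
  | cons c cs ih =>
      intro acc h
      have hc := dom_char_le (h c (by simp))
      obtain ⟨hlen, hval⟩ := block_spec c.toNat hc
      have hblock : List.foldl (fun a c => a * 2 + (if c = '1' then 1 else 0)) acc
          (padGo 7 (PySem.Int.toBinChars (c.toNat : Int))) = arithStep acc c := by
        rw [parse_affine, hlen]
        unfold parseBin at hval
        rw [hval]
        unfold arithStep
        norm_num
      simp only [List.map_cons, List.flatten_cons, List.foldl_append]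
      rw [hblock]
      simp only [List.foldl_cons]
      exact ih _ (fun x hx => h x (by simp [hx]))

-- B's shift-and-or fold is the arithmetic fold (accumulator stays nonnegative)
theorem b_fold (cs : List Char) : ∀ acc : Int, (∀ c ∈ cs, pvDomChar c = true) → 0 ≤ acc →
    cs.foldl (fun result c =>
        let w : Nat := 7 * (((PySem.Int.toBinChars (c.toNat : Int)).length + 6) / 7)
        PySem.Int.bor (result <<< w) (c.toNat : Int)) acc
      = cs.foldl arithStep acc := by
  induction cs with
  | nil => intro acc _ _; simp
  | cons c cs ih =>
      intro acc h hacc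
      have hc := dom_char_le (h c (by simp))
      simp only [List.foldl_cons]
      rw [show (7 * (((PySem.Int.toBinChars (c.toNat : Int)).length + 6) / 7) : Nat) = 7 by
            rw [width_spec c.toNat hc]]
      rw [bor_step acc c.toNat hacc hc]
      rw [ih _ (fun x hx => h x (by simp [hx])) (by positivity)]
      rfl

-- ===== VERDICT (by name: the statement is the Claim_ definition above) =====
theorem mes2dec_spec : Claim_equal_mes2dec := by
  intro m hd _
  unfold Spec_mes2dec mes2dec mes2dec_alt parseBin
  have hall : ∀ c ∈ m.toList, pvDomChar c = true := by
    have := hd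
    unfold Dom_mes2dec pvDomStr at this
    simpa [List.all_eq_true] using this
  rw [List.map_map]
  simp only [Function.comp_def]
  rw [a_fold m.toList 0 hall, b_fold m.toList 0 hall le_rfl]
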